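-- pv_equiv track=rewrite | github.com/tomkodzi/bioinf | BioInf7.py | check_duplicates_in_seq
-- ===== SOURCE A (Python) =====
-- def check_duplicates_in_seq(list):
--     list.sort()
--     new_list=[]
--     i = len(list) - 1
--     while i > 0:
--         if list[i] == list[i - 1]:
--             new_list.append(list[i])
--         i -= 1
--     return new_list
-- ===== SOURCE B (Python) =====
-- def check_duplicates_in_seq(list):
--     # Counting approach: tally occurrences in one pass, then emit each value
--     # (count - 1) times over the distinct values sorted descending.
--     # Note: unlike the original, this does NOT sort the argument in place.
--     counts = {}
--     for x in list:
--         counts[x] = counts.get(x, 0) + 1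
--     new_list = []
--     for v in sorted(counts, reverse=True):
--         new_list.extend([v] * (counts[v] - 1))
--     return new_list
-- ===== Notes on version B (the rewrite author's own statement) =====
-- stated objective: alternative
-- what changed: Replaces sort-then-backward-neighbour-scan with a counting dict built in one pass over the unsorted input, then sorts only the distinct values descending and emits each one (count-1) times; B does not mutate the argument (A sorts it in place), the equivalence is about the return value.
import Mathlib
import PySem

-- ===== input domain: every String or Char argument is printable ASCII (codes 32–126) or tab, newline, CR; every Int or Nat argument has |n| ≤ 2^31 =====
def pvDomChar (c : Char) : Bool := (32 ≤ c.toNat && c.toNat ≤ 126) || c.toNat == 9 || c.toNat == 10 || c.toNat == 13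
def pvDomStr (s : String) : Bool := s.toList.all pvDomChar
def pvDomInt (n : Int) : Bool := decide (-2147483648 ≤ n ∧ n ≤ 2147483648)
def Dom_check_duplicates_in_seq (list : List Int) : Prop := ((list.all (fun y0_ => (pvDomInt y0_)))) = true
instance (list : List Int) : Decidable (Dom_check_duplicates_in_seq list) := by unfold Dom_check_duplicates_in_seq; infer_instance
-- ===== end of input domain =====

-- B replaces A's sort + backward neighbour scan by a counting dict built in one pass over the
-- UNSORTED input; only the distinct values are then sorted (descending) and each is emitted
-- (count-1) times. A sorts its argument in place and B does not: the equivalence proved here is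
-- about the RETURN value only.

-- ===== PORT A =====
-- A's while-loop: i counts down from len-1; indices are always in range, so list[i] is
-- ported exactly by pyGetD with an unused default.
def pvALoop (s : List Int) : Nat → List Int → List Int
  | 0, acc => acc
  | Nat.succ k, acc =>
      pvALoop s k
        (if PySem.List.pyGetD s ((k + 1 : Nat) : Int) 0 = PySem.List.pyGetD s ((k : Nat) : Int) 0
         then acc ++ [PySem.List.pyGetD s ((k + 1 : Nat) : Int) 0] else acc)

def check_duplicates_in_seq (list : List Int) : List Int :=
  let s := PySem.List.sorted list (fun x => x) false
  pvALoop s (s.length - 1) []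

-- ===== PORT B =====
-- counts[x] = counts.get(x, 0) + 1 in a loop; then for v in sorted(counts, reverse=True):
-- new_list.extend([v] * (counts[v] - 1)).
def check_duplicates_in_seq_alt (list : List Int) : List Int :=
  let counts := list.foldl (fun d x => d.insert x (d.getD x 0 + 1)) PySem.Dict.empty
  (PySem.List.sorted counts.keys (fun x => x) true).foldl
    (fun new_list v => new_list ++ PySem.List.pyRepeat [v] (counts.getD v 0 - 1)) []

-- ===== PRECONDITION & SPEC =====
def Spec_check_duplicates_in_seq (list : List Int) (out : List Int) : Prop := out = check_duplicates_in_seq_alt list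
instance (list : List Int) (out : List Int) : Decidable (Spec_check_duplicates_in_seq list out) := by unfold Spec_check_duplicates_in_seq; infer_instance

-- ===== CLAIM (what is proved, stated in full; the proofs are below) =====
def Claim_equal_check_duplicates_in_seq : Prop := ∀ (list : List Int), Dom_check_duplicates_in_seq list → Spec_check_duplicates_in_seq list (check_duplicates_in_seq list)


-- ===== LEMMAS AND PROOFS =====

-- reference form of A: adjacent-duplicate scan, keeping the first of each equal pair
def pvDupScan : List Int → List Int
  | a :: b :: t => if a = b then a :: pvDupScan (b :: t) else pvDupScan (b :: t)
  | _ => []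

-- leading run of a in t: its length and the remainder
def pvRun (a : Int) : List Int → Nat × List Int
  | [] => (0, [])
  | b :: u => if b = a then let p := pvRun a u; (p.1 + 1, p.2) else (0, b :: u)

theorem pvRun_decomp (a : Int) : ∀ (t : List Int), t = List.replicate (pvRun a t).1 a ++ (pvRun a t).2
  | [] => by simp [pvRun]
  | b :: u => by
      by_cases h : b = a
      · subst h
        have ih := pvRun_decomp b u
        have hr : pvRun b (b :: u) = ((pvRun b u).1 + 1, (pvRun b u).2) := by simp [pvRun]
        rw [hr, List.replicate_succ, List.cons_append]
        exact congrArg (b :: ·) ih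
      · simp [pvRun, h]

theorem pvRun_rest_sublist (a : Int) : ∀ (t : List Int), (pvRun a t).2.Sublist t
  | [] => by simp [pvRun]
  | b :: u => by
      by_cases h : b = a
      · simpa [pvRun, h] using (pvRun_rest_sublist a u).cons b
      · simp [pvRun, h]

theorem pvRun_rest_head (a : Int) : ∀ (t : List Int),
    (pvRun a t).2 = [] ∨ ∃ b u, (pvRun a t).2 = b :: u ∧ b ≠ a
  | [] => Or.inl rfl
  | b :: u => by
      by_cases h : b = a
      · simpa [pvRun, h] using pvRun_rest_head a u
      · exact Or.inr ⟨b, u, by simp [pvRun, h], h⟩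

theorem pvTake_succ_reverse (s : List Int) (k : Nat) (hk : k < s.length) :
    (s.take (k + 1)).reverse = s[k] :: (s.take k).reverse := by
  rw [List.take_add_one, List.getElem?_eq_getElem hk]
  simp

-- A's loop computes the adjacent-duplicate scan of the reversed prefix
theorem pvALoop_eq_dupScan (s : List Int) :
    ∀ (i : Nat), i < s.length → ∀ acc, pvALoop s i acc = acc ++ pvDupScan ((s.take (i + 1)).reverse)
  | 0, _, acc => by
      cases h : s with
      | nil => simp [pvALoop, pvDupScan]
      | cons x t => simp [pvALoop, pvDupScan]
  | Nat.succ k, hk, acc => by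
      have hk' : k < s.length := Nat.lt_of_succ_lt hk
      have hg1 : PySem.List.pyGetD s ((k + 1 : Nat) : Int) 0 = s[k + 1] :=
        PySem.List.pyGetD_ofNat s (k + 1) 0 hk
      have hg0 : PySem.List.pyGetD s ((k : Nat) : Int) 0 = s[k] :=
        PySem.List.pyGetD_ofNat s k 0 hk'
      rw [pvALoop, pvALoop_eq_dupScan s k hk']
      rw [pvTake_succ_reverse s (k + 1) hk, pvTake_succ_reverse s k hk']
      rw [pvDupScan, hg1, hg0]
      by_cases h : s[k + 1] = s[k]
      · simp [h]
      · simp [h]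

theorem pvA_eq_dupScan (s : List Int) : pvALoop s (s.length - 1) [] = pvDupScan s.reverse := by
  cases s with
  | nil => simp [pvALoop, pvDupScan]
  | cons x t =>
      have h : (x :: t).length - 1 < (x :: t).length := by simp
      rw [pvALoop_eq_dupScan (x :: t) _ h []]
      have h2 : (x :: t).length - 1 + 1 = (x :: t).length := by simp
      rw [h2, List.take_length]
      simp

-- dupScan across one run: the boundary pair differs, the in-run pairs all emit
theorem pvDupScan_run (a : Int) : ∀ (m : Nat) (u : List Int),
    (u = [] ∨ ∃ b u', u = b :: u' ∧ b ≠ a) →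
    pvDupScan (List.replicate (m + 1) a ++ u) = List.replicate m a ++ pvDupScan u
  | 0, u, h => by
      rcases h with h | ⟨b, u', rfl, hb⟩
      · subst h; simp [pvDupScan]
      · have hab : ¬ a = b := fun e => hb e.symm
        simp [pvDupScan, hab]
  | Nat.succ m, u, h => by
      have ih := pvDupScan_run a m u h
      simp only [List.replicate_succ, List.cons_append] at ih ⊢
      rw [pvDupScan, if_pos rfl]
      exact congrArg (a :: ·) ih

-- foldl Set.add ignores a value already at the head of the accumulator
theorem pvFoldl_add_cons (a : Int) : ∀ (u : List Int), a ∉ u →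
    ∀ acc : List Int, u.foldl PySem.Set.add (a :: acc) = a :: u.foldl PySem.Set.add acc
  | [], _, acc => rfl
  | x :: u, h, acc => by
      have hxa : x ≠ a := fun e => h (by simp [e])
      have hu : a ∉ u := fun e => h (by simp [e])
      rw [List.foldl_cons, List.foldl_cons,
        PySem.Set.add_eq_ite (a :: acc) x, PySem.Set.add_eq_ite acc x]
      by_cases hx : x ∈ acc
      · rw [if_pos (by simp [hx]), if_pos hx]
        exact pvFoldl_add_cons a u hu acc
      · rw [if_neg (by simp [hx, hxa]), if_neg hx, List.cons_append]
        exact pvFoldl_add_cons a u hu (acc ++ [x])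

theorem pvFoldl_add_replicate (a : Int) : ∀ (m : Nat) (acc : List Int), a ∈ acc →
    (List.replicate m a).foldl PySem.Set.add acc = acc
  | 0, acc, _ => rfl
  | Nat.succ m, acc, h => by
      rw [List.replicate_succ, List.foldl_cons, PySem.Set.add_eq_ite, if_pos h]
      exact pvFoldl_add_replicate a m acc h

theorem pvOfList_run (a : Int) (m : Nat) (u : List Int) (hu : a ∉ u) :
    PySem.Set.ofList (List.replicate (m + 1) a ++ u) = a :: PySem.Set.ofList u := by
  rw [PySem.Set.ofList_eq_foldl, PySem.Set.ofList_eq_foldl, List.foldl_append,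
    List.replicate_succ, List.foldl_cons]
  have h1 : PySem.Set.add ([] : List Int) a = [a] := rfl
  rw [h1, pvFoldl_add_replicate a m [a] (by simp)]
  exact pvFoldl_add_cons a u hu []

-- foldl Set.add only appends: the new part is a sublist of the consumed list
theorem pvFoldl_add_sublist : ∀ (u acc : List Int),
    ∃ t, u.foldl PySem.Set.add acc = acc ++ t ∧ t.Sublist u
  | [], acc => ⟨[], by simp, List.Sublist.refl []⟩
  | x :: u, acc => by
      rw [List.foldl_cons, PySem.Set.add_eq_ite]
      by_cases hx : x ∈ acc
      · rw [if_pos hx]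
        obtain ⟨t, ht, hs⟩ := pvFoldl_add_sublist u acc
        exact ⟨t, ht, hs.cons x⟩
      · rw [if_neg hx]
        obtain ⟨t, ht, hs⟩ := pvFoldl_add_sublist u (acc ++ [x])
        exact ⟨x :: t, by simpa using ht, hs.cons₂ x⟩

theorem pvOfList_sublist (u : List Int) : (PySem.Set.ofList u : List Int).Sublist u := by
  obtain ⟨t, ht, hs⟩ := pvFoldl_add_sublist u []
  rw [PySem.Set.ofList_eq_foldl, ht]
  simpa using hs

-- MAIN: on a descending list, the adjacent scan is the run-length form over the distinct values
theorem pvMainRun : ∀ (n : Nat) (r : List Int), r.length ≤ n → r.Pairwise (fun a b => b ≤ a) →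
    pvDupScan r = (PySem.Set.ofList r : List Int).flatMap (fun v => List.replicate (r.count v - 1) v)
  | _, [], _, _ => by simp [pvDupScan, PySem.Set.ofList]
  | 0, a :: t, hlen, _ => absurd hlen (by simp)
  | Nat.succ n, a :: t, hlen, hp => by
      rcases List.pairwise_cons.mp hp with ⟨ha, ht⟩
      have hdec : t = List.replicate (pvRun a t).1 a ++ (pvRun a t).2 := pvRun_decomp a t
      have hsub : (pvRun a t).2.Sublist t := pvRun_rest_sublist a t
      have hupw : (pvRun a t).2.Pairwise (fun a b => b ≤ a) := ht.sublist hsub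
      have hhead := pvRun_rest_head a t
      have hanu : a ∉ (pvRun a t).2 := by
        rcases hhead with h0 | ⟨b, u', hbu, hb⟩
        · simp [h0]
        · rw [hbu]
          have hbt : b ∈ t := hsub.mem (by rw [hbu]; simp)
          have hblt : b < a := lt_of_le_of_ne (ha b hbt) hb
          intro hmem
          rcases List.mem_cons.mp hmem with he | hmem'
          · exact hb he.symm
          · have hab : a ≤ b := (List.pairwise_cons.mp (hbu ▸ hupw)).1 a hmem'
            omega
      have hrdec : a :: t = List.replicate ((pvRun a t).1 + 1) a ++ (pvRun a t).2 := by
        rw [List.replicate_succ, List.cons_append]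
        exact congrArg (a :: ·) hdec
      have hlenu : (pvRun a t).2.length ≤ n := by
        have h1 := hsub.length_le
        have h2 : t.length ≤ n := by simpa using hlen
        omega
      rw [hrdec, pvDupScan_run a (pvRun a t).1 (pvRun a t).2 hhead,
        pvOfList_run a (pvRun a t).1 (pvRun a t).2 hanu, List.flatMap_cons]
      have hca : (List.replicate ((pvRun a t).1 + 1) a ++ (pvRun a t).2).count a = (pvRun a t).1 + 1 := by
        simp [List.count_append, List.count_replicate, List.count_eq_zero.mpr hanu]
      rw [hca]
      congr 1
      rw [pvMainRun n (pvRun a t).2 hlenu hupw]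
      apply List.flatMap_congr
      intro v hv
      have hvu : v ∈ (pvRun a t).2 := (PySem.Set.mem_ofList _ v).mp hv
      have hva : v ≠ a := fun e => hanu (e ▸ hvu)
      have hav : ¬ (a == v) = true := by simpa using fun e => hva e.symm
      simp [List.count_append, List.count_replicate, hav]

-- ===== VERDICT (by name: the statement is the Claim_ definition above) =====
theorem check_duplicates_in_seq_spec : Claim_equal_check_duplicates_in_seq := by
  intro list _
  unfold Spec_check_duplicates_in_seq check_duplicates_in_seq check_duplicates_in_seq_alt
  simp only [PySem.Dict.foldl_insert_getD_add_one_eq_counter, PySem.Dict.keys_counter,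
    PySem.List.foldl_append_eq_flatMap, List.nil_append, PySem.Dict.getD_counter]
  have hperm : (PySem.List.sorted list (fun x => x) false).reverse.Perm list :=
    (List.reverse_perm _).trans (PySem.List.sorted_perm list _ _)
  have hpw : (PySem.List.sorted list (fun x => x) false).reverse.Pairwise (fun a b => b ≤ a) :=
    List.pairwise_reverse.mpr (PySem.List.sorted_pairwise list (fun x => x))
  have hkeys : PySem.List.sorted (PySem.Set.ofList list) (fun x => x) true
      = PySem.Set.ofList (PySem.List.sorted list (fun x => x) false).reverse := by
    apply PySem.List.sorted_rev_eq_of_perm_of_pairwise_gt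
    · exact (List.perm_ext_iff_of_nodup (PySem.Set.nodup_ofList _) (PySem.Set.nodup_ofList _)).mpr
        (fun x => by simp [PySem.Set.mem_ofList, hperm.mem_iff])
    · have h1 : (PySem.Set.ofList (PySem.List.sorted list (fun x => x) false).reverse :
          List Int).Pairwise (fun a b => b ≤ a) :=
        hpw.sublist (pvOfList_sublist _)
      have h2 := PySem.Set.nodup_ofList (PySem.List.sorted list (fun x => x) false).reverse
      exact (h1.and h2).imp (fun h => (Ne.symm h.2).lt_of_le h.1)
  rw [hkeys, pvA_eq_dupScan,
    pvMainRun (PySem.List.sorted list (fun x => x) false).reverse.length _ le_rfl hpw]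
  apply List.flatMap_congr
  intro v hv
  rw [PySem.List.pyRepeat_singleton, hperm.count_eq]
  congr 1
  omega
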